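-- pv_equiv track=rewrite | github.com/Fatimarizz/GenderDisparityInTech | src/data_collector.py | _infer_gender_from_username
-- ===== SOURCE A (Python) =====
-- def _infer_gender_from_username(username: str) -> str:
--     """
--     Infer gender from username using various heuristics
--     This is a simplified approach - in practice, more sophisticated methods would be used
--     """
--     if not username or username.lower() in ['deleted', 'anonymous', 'unknown']:
--         return 'anonymous'
--     username_lower = username.lower()
--     female_indicators = ['sarah', 'emma', 'olivia', 'ava', 'isabella', 'sophia', 'charlotte', 'mia', 'amelia', 'harper']
--     male_indicators = ['james', 'john', 'robert', 'michael', 'william', 'david', 'richard', 'joseph', 'thomas', 'christopher']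
--     if any(indicator in username_lower for indicator in female_indicators):
--         return 'female'
--     elif any(indicator in username_lower for indicator in male_indicators):
--         return 'male'
--     if any(pattern in username_lower for pattern in ['girl', 'woman', 'lady', 'ms', 'miss', 'mrs']):
--         return 'female'
--     elif any(pattern in username_lower for pattern in ['guy', 'man', 'mr', 'dude']):
--         return 'male'
--     return 'anonymous'
-- ===== SOURCE B (Python) =====
-- _PATTERNS = ['sarah', 'emma', 'olivia', 'ava', 'isabella', 'sophia', 'charlotte',
--              'mia', 'amelia', 'harper',
--              'james', 'john', 'robert', 'michael', 'william', 'david', 'richard',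
--              'joseph', 'thomas', 'christopher',
--              'girl', 'woman', 'lady', 'ms', 'miss', 'mrs',
--              'guy', 'man', 'mr', 'dude']
-- _LABELS = ['female'] * 10 + ['male'] * 10 + ['female'] * 6 + ['male'] * 4
--
--
-- def _infer_gender_from_username(username: str) -> str:
--     if not username or username.lower() in ('deleted', 'anonymous', 'unknown'):
--         return 'anonymous'
--     u = username.lower()
--     # single left-to-right sweep over the string: at each position, record the
--     # smallest table priority of a pattern starting there
--     best = len(_PATTERNS)
--     for i in range(len(u)):
--         for k, p in enumerate(_PATTERNS):
--             if k < best and u.startswith(p, i):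
--                 best = k
--     return _LABELS[best] if best < len(_PATTERNS) else 'anonymous'
-- ===== Notes on version B (the rewrite author's own statement) =====
-- stated objective: alternative
-- what changed: Instead of four any()-substring scans in precedence order, B makes a single left-to-right sweep over the string, at each position checking which patterns start there via startswith and keeping the minimum table priority matched; the label of the best priority is returned, so no substring containment test remains.
import Mathlib
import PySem

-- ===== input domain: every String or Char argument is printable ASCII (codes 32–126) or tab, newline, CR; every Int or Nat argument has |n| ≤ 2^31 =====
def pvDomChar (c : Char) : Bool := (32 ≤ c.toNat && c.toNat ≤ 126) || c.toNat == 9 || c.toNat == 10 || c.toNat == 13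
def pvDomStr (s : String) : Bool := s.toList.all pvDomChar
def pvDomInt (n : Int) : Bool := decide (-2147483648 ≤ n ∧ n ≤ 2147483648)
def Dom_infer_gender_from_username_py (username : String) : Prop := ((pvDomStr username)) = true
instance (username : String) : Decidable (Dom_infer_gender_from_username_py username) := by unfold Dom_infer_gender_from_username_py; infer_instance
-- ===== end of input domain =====

-- B replaces A's four precedence-ordered any()-substring scans with a single sweep over the
-- string positions keeping the minimum matched table priority (objective: alternative).


-- ===== PORT A =====
def infer_gender_from_username_py (username : String) : String :=
  if username == "" ||
      ["deleted", "anonymous", "unknown"].any (fun s => PySem.Str.lower username == s) then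
    "anonymous"
  else
    let username_lower := PySem.Str.lower username
    let female_indicators := ["sarah", "emma", "olivia", "ava", "isabella", "sophia", "charlotte", "mia", "amelia", "harper"]
    let male_indicators := ["james", "john", "robert", "michael", "william", "david", "richard", "joseph", "thomas", "christopher"]
    if female_indicators.any (fun i => PySem.Str.isIn i username_lower) then
      "female"
    else if male_indicators.any (fun i => PySem.Str.isIn i username_lower) then
      "male"
    else if (["girl", "woman", "lady", "ms", "miss", "mrs"]).any (fun p => PySem.Str.isIn p username_lower) then
      "female"
    else if (["guy", "man", "mr", "dude"]).any (fun p => PySem.Str.isIn p username_lower) then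
      "male"
    else
      "anonymous"

-- ===== PORT B =====
-- Source B's _PATTERNS and _LABELS module constants
def pvPatterns : List String :=
  ["sarah", "emma", "olivia", "ava", "isabella", "sophia", "charlotte", "mia", "amelia", "harper",
   "james", "john", "robert", "michael", "william", "david", "richard", "joseph", "thomas", "christopher",
   "girl", "woman", "lady", "ms", "miss", "mrs",
   "guy", "man", "mr", "dude"]
def pvLabels : List String :=
  List.replicate 10 "female" ++ List.replicate 10 "male" ++ List.replicate 6 "female" ++ List.replicate 4 "male"

-- Source B's inner `for k, p in enumerate(_PATTERNS)` loop; `u.startswith(p, i)` with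
-- 0 ≤ i ≤ len(u) is exactly a prefix test on the drop, ported with Chars.startswith.
def pvInner (tail : List Char) (k : Nat) (ps : List String) (best : Nat) : Nat :=
  match ps with
  | [] => best
  | p :: rest =>
      pvInner tail (k + 1) rest
        (if k < best ∧ PySem.Chars.startswith tail p.toList then k else best)

def infer_gender_from_username_py_alt (username : String) : String :=
  if username == "" || ["deleted", "anonymous", "unknown"].contains (PySem.Str.lower username) then
    "anonymous"
  else
    let u := (PySem.Str.lower username).toList
    -- Source B's outer `for i in range(len(u))` sweep with the min-priority accumulator
    let best := (List.range u.length).foldl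
      (fun best i => pvInner (u.drop i) 0 pvPatterns best) pvPatterns.length
    if best < pvPatterns.length then pvLabels.getD best "anonymous" else "anonymous"

-- ===== PRECONDITION & SPEC =====
def Spec_infer_gender_from_username_py (username : String) (out : String) : Prop := out = infer_gender_from_username_py_alt username
instance (username : String) (out : String) : Decidable (Spec_infer_gender_from_username_py username out) := by unfold Spec_infer_gender_from_username_py; infer_instance

-- ===== CLAIM (what is proved, stated in full; the proofs are below) =====
def Claim_equal_infer_gender_from_username_py : Prop := ∀ (username : String), Dom_infer_gender_from_username_py username → Spec_infer_gender_from_username_py username (infer_gender_from_username_py username)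

-- ===== LEMMAS AND PROOFS =====

-- the inner loop computes the min of the accumulator and (offset + first matching pattern index)
theorem pvInner_spec (tail : List Char) : ∀ (ps : List String) (k best : Nat),
    best ≤ k + ps.length →
    pvInner tail k ps best
      = min best (k + ps.findIdx (fun p => PySem.Chars.startswith tail p.toList)) := by
  intro ps
  induction ps with
  | nil =>
    intro k best h
    simp only [List.length_nil] at h
    simp [pvInner]
    omega
  | cons p rest ih =>
    intro k best h
    simp only [List.length_cons] at h
    simp only [pvInner, List.findIdx_cons]
    cases hs : PySem.Chars.startswith tail p.toList
    · rw [if_neg (by simp)]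
      rw [ih (k + 1) best (by omega)]
      simp only [cond_false]
      omega
    · simp only [cond_true]
      by_cases hk : k < best
      · rw [if_pos ⟨hk, trivial⟩]
        rw [ih (k + 1) k (by omega)]
        have := List.findIdx_le_length (p := fun p => PySem.Chars.startswith tail p.toList) (xs := rest)
        omega
      · rw [if_neg (by simp [hk])]
        rw [ih (k + 1) best (by omega)]
        omega

-- the min-accumulator fold is below its start value …
theorem pv_foldl_min_le_init (f : Nat → Nat) : ∀ (l : List Nat) (a : Nat),
    List.foldl (fun b i => min b (f i)) a l ≤ a := by
  intro l
  induction l with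
  | nil => intro a; simp
  | cons i t ih =>
    intro a
    calc List.foldl (fun b i => min b (f i)) (min a (f i)) t ≤ min a (f i) := ih _
      _ ≤ a := by omega

-- … below every scanned value …
theorem pv_foldl_min_le_mem (f : Nat → Nat) : ∀ (l : List Nat) (a j : Nat), j ∈ l →
    List.foldl (fun b i => min b (f i)) a l ≤ f j := by
  intro l
  induction l with
  | nil => intro a j hj; simp at hj
  | cons i t ih =>
    intro a j hj
    rcases List.mem_cons.mp hj with rfl | hj
    · calc List.foldl (fun b i => min b (f i)) (min a (f j)) t ≤ min a (f j) :=
        pv_foldl_min_le_init f t _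
        _ ≤ f j := by omega
    · exact ih _ j hj
-- … and is the greatest such bound
theorem pv_le_foldl_min (f : Nat → Nat) : ∀ (l : List Nat) (a c : Nat), c ≤ a →
    (∀ j ∈ l, c ≤ f j) → c ≤ List.foldl (fun b i => min b (f i)) a l := by
  intro l
  induction l with
  | nil => intro a c h _; simpa using h
  | cons i t ih =>
    intro a c h hall
    simp only [List.foldl_cons]
    have hi := hall i (List.mem_cons_self)
    exact ih _ c (by omega) (fun j hj => hall j (List.mem_cons_of_mem _ hj))

-- findIdx is antitone in the predicate
theorem pv_findIdx_mono {α : Type} (P Q : α → Bool) (h : ∀ x, P x = true → Q x = true) :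
    ∀ l : List α, l.findIdx Q ≤ l.findIdx P := by
  intro l
  induction l with
  | nil => simp
  | cons a t ih =>
    simp only [List.findIdx_cons]
    cases hP : P a
    · cases hQ : Q a
      · simp only [cond_false]; omega
      · simp
    · simp [h a hP]

-- findIdx is at most any index whose element satisfies the predicate
theorem pv_findIdx_le_of_elem {α : Type} (P : α → Bool) : ∀ (l : List α) (k : Nat)
    (hk : k < l.length), P l[k] = true → l.findIdx P ≤ k := by
  intro l
  induction l with
  | nil => intro k hk; simp at hk
  | cons a t ih =>
    intro k hk hP
    cases k with
    | zero =>
      have ha : P a = true := by simpa using hP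
      simp [List.findIdx_cons, ha]
    | succ k =>
      have hk' : k < t.length := by simp only [List.length_cons] at hk; omega
      simp only [List.findIdx_cons]
      cases hPa : P a
      · simp only [cond_false]
        have := ih k hk' (by simpa using hP)
        omega
      · simp

-- every table pattern is a nonempty string
theorem pvPatterns_nonempty : ∀ p ∈ pvPatterns, p.toList ≠ [] := by decide

-- the sweep's result is exactly the first pattern (in table order) occurring anywhere in u
theorem pv_best_eq (u : List Char) :
    (List.range u.length).foldl (fun best i => pvInner (u.drop i) 0 pvPatterns best) pvPatterns.length
      = pvPatterns.findIdx (fun p => PySem.Chars.isIn p.toList u) := by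
  have hfold : (List.range u.length).foldl (fun best i => pvInner (u.drop i) 0 pvPatterns best) pvPatterns.length
      = (List.range u.length).foldl
          (fun b i => min b (pvPatterns.findIdx (fun p => PySem.Chars.startswith (u.drop i) p.toList)))
          pvPatterns.length := by
    have : ∀ (l : List Nat) (a : Nat), a ≤ pvPatterns.length →
        l.foldl (fun best i => pvInner (u.drop i) 0 pvPatterns best) a
          = l.foldl (fun b i => min b (pvPatterns.findIdx (fun p => PySem.Chars.startswith (u.drop i) p.toList))) a := by
      intro l
      induction l with
      | nil => intro a _; simp
      | cons i t ih =>
        intro a ha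
        simp only [List.foldl_cons]
        rw [pvInner_spec (u.drop i) pvPatterns 0 a (by simpa using ha), Nat.zero_add]
        exact ih _ (by omega)
    exact this _ _ le_rfl
  rw [hfold]
  set G := pvPatterns.findIdx (fun p => PySem.Chars.isIn p.toList u) with hG
  have hGlen : G ≤ pvPatterns.length := List.findIdx_le_length
  apply Nat.le_antisymm
  · by_cases hlt : G < pvPatterns.length
    · have hin : PySem.Chars.isIn (pvPatterns[G]'hlt).toList u = true := by
        have := List.findIdx_getElem (w := hlt)
        simpa [hG] using this
      obtain ⟨j, hj⟩ := (PySem.Chars.exists_prefix_drop_iff_isIn _ _).mpr hin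
      have hne : (pvPatterns[G]'hlt).toList ≠ [] :=
        pvPatterns_nonempty _ (List.getElem_mem hlt)
      have hjlen : j < u.length := by
        by_contra hge
        have : List.drop j u = [] := List.drop_eq_nil_of_le (by omega)
        rw [this] at hj
        exact hne (List.prefix_nil.mp hj)
      have h1 : List.foldl
          (fun b i => min b (pvPatterns.findIdx (fun p => PySem.Chars.startswith (u.drop i) p.toList)))
          pvPatterns.length (List.range u.length)
          ≤ pvPatterns.findIdx (fun p => PySem.Chars.startswith (u.drop j) p.toList) :=
        pv_foldl_min_le_mem _ _ _ j (List.mem_range.mpr hjlen)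
      have h2 : pvPatterns.findIdx (fun p => PySem.Chars.startswith (u.drop j) p.toList) ≤ G := by
        apply pv_findIdx_le_of_elem _ _ G hlt
        exact (PySem.Chars.startswith_iff _ _).mpr hj
      omega
    · have : G = pvPatterns.length := by omega
      rw [this]
      exact pv_foldl_min_le_init _ _ _
  · apply pv_le_foldl_min _ _ _ _ hGlen
    intro j _
    apply pv_findIdx_mono
    intro p hp
    exact (PySem.Chars.exists_prefix_drop_iff_isIn _ _).mp
      ⟨j, (PySem.Chars.startswith_iff _ _).mp hp⟩

-- ===== VERDICT (by name: the statement is the Claim_ definition above) =====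
set_option maxHeartbeats 2000000 in
theorem infer_gender_from_username_py_spec : Claim_equal_infer_gender_from_username_py := by
  intro username _
  unfold Spec_infer_gender_from_username_py infer_gender_from_username_py infer_gender_from_username_py_alt
  simp only [pv_best_eq]
  simp only [List.any_cons, List.any_nil, List.contains_cons, List.contains_nil, Bool.or_false]
  generalize PySem.Str.lower username = u
  by_cases hg : (username == "" || (u == "deleted" || (u == "anonymous" || u == "unknown"))) = true
  · simp [hg]
  · simp only [Bool.not_eq_true] at hg
    simp only [hg, Bool.false_eq_true, if_false]
    simp only [pvPatterns, pvLabels, List.findIdx_cons]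
    simp
    cases PySem.Chars.isIn ['s', 'a', 'r', 'a', 'h'] u.toList <;> simp
    cases PySem.Chars.isIn ['e', 'm', 'm', 'a'] u.toList <;> simp
    cases PySem.Chars.isIn ['o', 'l', 'i', 'v', 'i', 'a'] u.toList <;> simp
    cases PySem.Chars.isIn ['a', 'v', 'a'] u.toList <;> simp
    cases PySem.Chars.isIn ['i', 's', 'a', 'b', 'e', 'l', 'l', 'a'] u.toList <;> simp
    cases PySem.Chars.isIn ['s', 'o', 'p', 'h', 'i', 'a'] u.toList <;> simp
    cases PySem.Chars.isIn ['c', 'h', 'a', 'r', 'l', 'o', 't', 't', 'e'] u.toList <;> simp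
    cases PySem.Chars.isIn ['m', 'i', 'a'] u.toList <;> simp
    cases PySem.Chars.isIn ['a', 'm', 'e', 'l', 'i', 'a'] u.toList <;> simp
    cases PySem.Chars.isIn ['h', 'a', 'r', 'p', 'e', 'r'] u.toList <;> simp
    cases PySem.Chars.isIn ['j', 'a', 'm', 'e', 's'] u.toList <;> simp
    cases PySem.Chars.isIn ['j', 'o', 'h', 'n'] u.toList <;> simp
    cases PySem.Chars.isIn ['r', 'o', 'b', 'e', 'r', 't'] u.toList <;> simp
    cases PySem.Chars.isIn ['m', 'i', 'c', 'h', 'a', 'e', 'l'] u.toList <;> simp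
    cases PySem.Chars.isIn ['w', 'i', 'l', 'l', 'i', 'a', 'm'] u.toList <;> simp
    cases PySem.Chars.isIn ['d', 'a', 'v', 'i', 'd'] u.toList <;> simp
    cases PySem.Chars.isIn ['r', 'i', 'c', 'h', 'a', 'r', 'd'] u.toList <;> simp
    cases PySem.Chars.isIn ['j', 'o', 's', 'e', 'p', 'h'] u.toList <;> simp
    cases PySem.Chars.isIn ['t', 'h', 'o', 'm', 'a', 's'] u.toList <;> simp
    cases PySem.Chars.isIn ['c', 'h', 'r', 'i', 's', 't', 'o', 'p', 'h', 'e', 'r'] u.toList <;> simp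
    cases PySem.Chars.isIn ['g', 'i', 'r', 'l'] u.toList <;> simp
    cases PySem.Chars.isIn ['w', 'o', 'm', 'a', 'n'] u.toList <;> simp
    cases PySem.Chars.isIn ['l', 'a', 'd', 'y'] u.toList <;> simp
    cases PySem.Chars.isIn ['m', 's'] u.toList <;> simp
    cases PySem.Chars.isIn ['m', 'i', 's', 's'] u.toList <;> simp
    cases PySem.Chars.isIn ['m', 'r', 's'] u.toList <;> simp
    cases PySem.Chars.isIn ['g', 'u', 'y'] u.toList <;> simp
    cases PySem.Chars.isIn ['m', 'a', 'n'] u.toList <;> simp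
    cases PySem.Chars.isIn ['m', 'r'] u.toList <;> simp
    cases PySem.Chars.isIn ['d', 'u', 'd', 'e'] u.toList <;> simp
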